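-- pv_equiv track=rewrite | github.com/skyf0l/BaseCracker | basecracker.py | base85_encoder
-- ===== SOURCE A (Python) =====
-- def split_by_size(string, size):
--     splited = []
--     for k in range(0, len(string), size):
--         splited.append(string[0 + k:size + k])
--     return splited
--
-- base85_alphabet = '!"#$%&\'()*+,-./0123456789:;<=>?@ABCDEFGHIJKLMNOPQRSTUVWXYZ[\\]^_`abcdefghijklmnopqrstu'
--
-- def base85_encoder(plaintext):
--     cipher = ''
--
--     # padding
--     to_remove = 0
--     if len(plaintext) % 4 != 0:
--         to_remove = 4 - len(plaintext) % 4
--         plaintext += '\x00' * to_remove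
--
--     tokens = split_by_size(plaintext, 4)
--     for token in tokens:
--         value = 0
--         for c in token:
--             value *= 256
--             value += ord(c)
--         tmp_cipher = ''
--         for _ in range(5):
--             tmp_cipher += base85_alphabet[value % 85]
--             value //= 85
--         cipher += tmp_cipher[::-1]
--     if to_remove != 0:
--         cipher = cipher[0:-to_remove]
--     return cipher
-- ===== SOURCE B (Python) =====
-- base85_alphabet = '!"#$%&\'()*+,-./0123456789:;<=>?@ABCDEFGHIJKLMNOPQRSTUVWXYZ[\\]^_`abcdefghijklmnopqrstu'
--
-- def base85_encoder(plaintext):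
--     out = []
--     n = len(plaintext)
--     full = n - n % 4
--     for k in range(0, full, 4):
--         value = 0
--         for c in plaintext[k:k + 4]:
--             value = value * 256 + ord(c)
--         for i in range(4, -1, -1):
--             out.append(base85_alphabet[(value // 85 ** i) % 85])
--     r = n % 4
--     if r != 0:
--         value = 0
--         for c in plaintext[full:] + '\x00' * (4 - r):
--             value = value * 256 + ord(c)
--         for i in range(4, 4 - r - 1, -1):
--             out.append(base85_alphabet[(value // 85 ** i) % 85])
--     return ''.join(out)
-- ===== Notes on version B (the rewrite author's own statement) =====
-- stated objective: alternative
-- what changed: Replaces the global pad-then-strip pipeline (pad input, split into tokens, per block build 5 digits LSB-first into a temp string and reverse it, then slice off the tail) with a single pass over full 4-byte blocks that emits the 5 base-85 digits directly MSB-first via (value // 85**i) % 85, plus a separate partial-block branch that emits only the needed L+1 digits, accumulated in a list and joined once.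
import Mathlib
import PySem

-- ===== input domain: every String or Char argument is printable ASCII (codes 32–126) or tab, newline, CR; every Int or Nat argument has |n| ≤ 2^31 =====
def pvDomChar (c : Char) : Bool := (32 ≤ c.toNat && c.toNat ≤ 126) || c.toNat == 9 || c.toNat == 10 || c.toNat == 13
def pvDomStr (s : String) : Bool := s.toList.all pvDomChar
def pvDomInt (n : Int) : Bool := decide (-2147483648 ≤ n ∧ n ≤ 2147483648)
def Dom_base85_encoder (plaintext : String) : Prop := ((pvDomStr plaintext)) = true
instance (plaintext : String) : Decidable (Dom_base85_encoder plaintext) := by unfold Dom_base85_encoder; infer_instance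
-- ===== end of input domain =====

-- B re-structures A's pad-then-strip pipeline into a direct MSB-first digit emission per full
-- block plus a separate partial-block branch (objective: alternative decomposition, same cost).

-- ===== PORT A =====
def base85_alphabet : List Char :=
  "!\"#$%&'()*+,-./0123456789:;<=>?@ABCDEFGHIJKLMNOPQRSTUVWXYZ[\\]^_`abcdefghijklmnopqrstu".toList

def split_by_size (string : List Char) (size : Int) : List (List Char) :=
  (PySem.List.pyRange 0 (string.length : Int) size).foldl
    (fun splited k => splited ++ [PySem.List.slice string (some (0 + k)) (some (size + k))]) []

def base85_encoder (plaintext : String) : String :=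
  let cs := plaintext.toList
  let to_remove : Int :=
    if PySem.Int.mod (cs.length : Int) 4 ≠ 0 then 4 - PySem.Int.mod (cs.length : Int) 4 else 0
  let padded : List Char :=
    if PySem.Int.mod (cs.length : Int) 4 ≠ 0 then cs ++ PySem.List.pyRepeat ['\x00'] to_remove
    else cs
  let tokens := split_by_size padded 4
  let cipher : List Char := tokens.foldl (fun cipher token =>
    let value : Int := token.foldl (fun v c => v * 256 + (c.toNat : Int)) 0
    let tmp := (PySem.List.pyRange 0 5 1).foldl
      (fun (st : List Char × Int) _ =>
        (st.1 ++ [PySem.List.pyGetD base85_alphabet (PySem.Int.mod st.2 85) ' '],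
         PySem.Int.floordiv st.2 85)) (([] : List Char), value)
    -- tmp_cipher[::-1] is List.reverse (PySem.List.slice?_none_none_neg_one)
    cipher ++ tmp.1.reverse) []
  let cipher := if to_remove ≠ 0 then PySem.List.slice cipher (some 0) (some (-to_remove)) else cipher
  String.ofList cipher

-- ===== PORT B =====
def base85_encoder_alt (plaintext : String) : String :=
  let cs := plaintext.toList
  let n : Int := cs.length
  let full : Int := n - PySem.Int.mod n 4
  let out : List Char := (PySem.List.pyRange 0 full 4).foldl (fun out k =>
    let value : Int := (PySem.List.slice cs (some k) (some (k + 4))).foldl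
      (fun v c => v * 256 + (c.toNat : Int)) 0
    (PySem.List.pyRange 4 (-1) (-1)).foldl (fun out i =>
      out ++ [PySem.List.pyGetD base85_alphabet
        (PySem.Int.mod (PySem.Int.floordiv value (85 ^ i.toNat)) 85) ' ']) out) []
  let r : Int := PySem.Int.mod n 4
  let out := if r ≠ 0 then
      let value : Int := (PySem.List.slice cs (some full) none
          ++ PySem.List.pyRepeat ['\x00'] (4 - r)).foldl
        (fun v c => v * 256 + (c.toNat : Int)) 0
      (PySem.List.pyRange 4 (4 - r - 1) (-1)).foldl (fun out i =>
        out ++ [PySem.List.pyGetD base85_alphabet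
          (PySem.Int.mod (PySem.Int.floordiv value (85 ^ i.toNat)) 85) ' ']) out
    else out
  String.ofList out

-- ===== PRECONDITION & SPEC =====
def Spec_base85_encoder (plaintext : String) (out : String) : Prop := out = base85_encoder_alt plaintext
instance (plaintext : String) (out : String) : Decidable (Spec_base85_encoder plaintext out) := by unfold Spec_base85_encoder; infer_instance

-- ===== CLAIM (what is proved, stated in full; the proofs are below) =====
def Claim_equal_base85_encoder : Prop := ∀ (plaintext : String), Dom_base85_encoder plaintext → Spec_base85_encoder plaintext (base85_encoder plaintext)

-- ===== LEMMAS AND PROOFS =====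

/-- the 4-byte block value as a `Nat` -/
def pvNatVal (t : List Char) : Nat := t.foldl (fun v c => v * 256 + c.toNat) 0

/-- one base-85 digit -/
def pvDigit (v : Nat) : Char := PySem.List.pyGetD base85_alphabet ((v % 85 : Nat) : Int) ' '

/-- the five digits of a block value, most significant first -/
def pvMsb (v : Nat) : List Char :=
  [pvDigit (v / 85 ^ 4), pvDigit (v / 85 ^ 3), pvDigit (v / 85 ^ 2), pvDigit (v / 85), pvDigit v]

theorem pv_val_cast (t : List Char) (v : Nat) :
    t.foldl (fun v c => v * 256 + (c.toNat : Int)) (v : Int)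
      = ((t.foldl (fun v c => v * 256 + c.toNat) v : Nat) : Int) := by
  induction t generalizing v with
  | nil => rfl
  | cons c t ih =>
      simp only [List.foldl_cons]
      rw [show ((v : Int) * 256 + (c.toNat : Int)) = ((v * 256 + c.toNat : Nat) : Int) by push_cast; ring]
      exact ih _

theorem pv_val0 (t : List Char) :
    List.foldl (fun v c => v * 256 + (c.toNat : Int)) 0 t = ((pvNatVal t : Nat) : Int) := by
  simpa [pvNatVal] using pv_val_cast t 0

theorem pv_fd_pow (v e : Nat) :
    PySem.Int.floordiv (v : Int) ((85 : Int) ^ e) = ((v / 85 ^ e : Nat) : Int) := by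
  rw [show ((85 : Int) ^ e) = ((85 ^ e : Nat) : Int) by push_cast; ring]
  exact PySem.Int.floordiv_natCast v (85 ^ e)

theorem pv_fd85 (v : Nat) : PySem.Int.floordiv (v : Int) 85 = ((v / 85 : Nat) : Int) :=
  PySem.Int.floordiv_natCast v 85

theorem pv_md85 (v : Nat) : PySem.Int.mod (v : Int) 85 = ((v % 85 : Nat) : Int) :=
  PySem.Int.mod_natCast v 85

/-- A's inner 5-step LSB-first loop, reversed, is the MSB-first digit list. -/
theorem pv_FA (t : List Char) :
    ((PySem.List.pyRange 0 5 1).foldl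
      (fun (st : List Char × Int) _ =>
        (st.1 ++ [PySem.List.pyGetD base85_alphabet (PySem.Int.mod st.2 85) ' '],
         PySem.Int.floordiv st.2 85))
      (([] : List Char), t.foldl (fun v c => v * 256 + (c.toNat : Int)) 0)).1.reverse
      = pvMsb (pvNatVal t) := by
  rw [pv_val0]
  generalize pvNatVal t = v
  rw [show PySem.List.pyRange 0 5 1 = [0,1,2,3,4] from rfl]
  simp only [List.foldl_cons, List.foldl_nil, pv_fd85, pv_md85]
  simp [pvMsb, pvDigit, Nat.div_div_eq_div_mul]

/-- B's inner countdown loop appends the MSB-first digit list. -/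
theorem pv_FB (t : List Char) (acc : List Char) :
    (PySem.List.pyRange 4 (-1) (-1)).foldl (fun out i =>
      out ++ [PySem.List.pyGetD base85_alphabet
        (PySem.Int.mod (PySem.Int.floordiv (t.foldl (fun v c => v * 256 + (c.toNat : Int)) 0)
          (85 ^ i.toNat)) 85) ' ']) acc
      = acc ++ pvMsb (pvNatVal t) := by
  rw [pv_val0]
  generalize pvNatVal t = v
  rw [show PySem.List.pyRange 4 (-1) (-1) = [4,3,2,1,0] from rfl]
  simp only [List.foldl_cons, List.foldl_nil, pv_fd_pow, pv_md85]
  simp [pvMsb, pvDigit]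

/-- B's partial-block countdown loop appends the first r+1 MSB-first digits. -/
theorem pv_tailB (t : List Char) (acc : List Char) (r : Nat) (h : r = 1 ∨ r = 2 ∨ r = 3) :
    (PySem.List.pyRange 4 (4 - (r : Int) - 1) (-1)).foldl (fun out i =>
      out ++ [PySem.List.pyGetD base85_alphabet
        (PySem.Int.mod (PySem.Int.floordiv (t.foldl (fun v c => v * 256 + (c.toNat : Int)) 0)
          (85 ^ i.toNat)) 85) ' ']) acc
      = acc ++ (pvMsb (pvNatVal t)).take (r + 1) := by
  rw [pv_val0]
  generalize pvNatVal t = v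
  rcases h with h | h | h <;> subst h
  · rw [show (4 - ((1 : Nat) : Int) - 1) = 2 by norm_num,
      show PySem.List.pyRange 4 2 (-1) = [4,3] from rfl]
    simp only [List.foldl_cons, List.foldl_nil, pv_fd_pow, pv_md85]
    simp [pvMsb, pvDigit]
  · rw [show (4 - ((2 : Nat) : Int) - 1) = 1 by norm_num,
      show PySem.List.pyRange 4 1 (-1) = [4,3,2] from rfl]
    simp only [List.foldl_cons, List.foldl_nil, pv_fd_pow, pv_md85]
    simp [pvMsb, pvDigit]
  · rw [show (4 - ((3 : Nat) : Int) - 1) = 0 by norm_num,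
      show PySem.List.pyRange 4 0 (-1) = [4,3,2,1] from rfl]
    simp only [List.foldl_cons, List.foldl_nil, pv_fd_pow, pv_md85]
    simp [pvMsb, pvDigit]

theorem pv_pyRange04 (q : Nat) :
    PySem.List.pyRange 0 ((4 * q : Nat) : Int) 4 = (List.range q).map (fun k => ((4 * k : Nat) : Int)) := by
  rw [PySem.List.pyRange_of_pos _ _ (by norm_num)]
  by_cases hq : 0 < q
  · rw [if_pos (by exact_mod_cast Nat.mul_pos (by norm_num) hq)]
    have : (((4 * q : Nat) : Int) - 0 + 4 - 1) / 4 = ((4 * q + 3 : Nat) : Int) / ((4 : Nat) : Int) := by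
      push_cast; ring_nf
    rw [this, ← Int.natCast_ediv]
    have h4 : (4 * q + 3) / 4 = q := by omega
    rw [h4, Int.toNat_natCast]
    apply List.map_congr_left; intro k _; push_cast; ring
  · have hq0 : q = 0 := by omega
    subst hq0; simp

theorem pv_sliceA (xs : List Char) (j : Nat) :
    PySem.List.slice xs (some (0 + ((4 * j : Nat) : Int))) (some (4 + ((4 * j : Nat) : Int)))
      = (xs.drop (4 * j)).take 4 := by
  rw [zero_add, show (4 + ((4 * j : Nat) : Int)) = ((4 * j + 4 : Nat) : Int) by push_cast; ring,
    PySem.List.slice_natCast]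
  congr 1; omega

theorem pv_sliceB (xs : List Char) (j : Nat) :
    PySem.List.slice xs (some ((4 * j : Nat) : Int)) (some (((4 * j : Nat) : Int) + 4))
      = (xs.drop (4 * j)).take 4 := by
  rw [show (((4 * j : Nat) : Int) + 4) = ((4 * j + 4 : Nat) : Int) by push_cast; ring,
    PySem.List.slice_natCast]
  congr 1; omega

/-- A's token loop over a length-4q list is a flatMap over its 4-blocks. -/
theorem pv_A_blocks (F : List Char → List Char) (xs : List Char) (q : Nat) (h : xs.length = 4 * q) :
    (split_by_size xs 4).foldl (fun c t => c ++ F t) []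
      = (List.range q).flatMap (fun j => F ((xs.drop (4 * j)).take 4)) := by
  unfold split_by_size
  rw [PySem.List.foldl_append_singleton_eq_map, List.nil_append, h, pv_pyRange04]
  rw [PySem.List.foldl_append_eq_flatMap, List.nil_append]
  rw [List.flatMap_map, List.flatMap_map]
  refine List.flatMap_congr (fun k _ => ?_)
  rw [pv_sliceA]

/-- B's full-block loop is a flatMap over the 4-blocks. -/
theorem pv_B_blocks (cs : List Char) (q : Nat) :
    (PySem.List.pyRange 0 ((4 * q : Nat) : Int) 4).foldl
      (fun out k => out ++ pvMsb (pvNatVal (PySem.List.slice cs (some k) (some (k + 4))))) []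
      = (List.range q).flatMap (fun j => pvMsb (pvNatVal ((cs.drop (4 * j)).take 4))) := by
  rw [pv_pyRange04, PySem.List.foldl_append_eq_flatMap, List.nil_append, List.flatMap_map]
  refine List.flatMap_congr (fun k _ => ?_)
  rw [pv_sliceB]

theorem pv_len_blocks (g : Nat → Nat) (q : Nat) :
    ((List.range q).flatMap (fun j => pvMsb (g j))).length = 5 * q := by
  simp [List.length_flatMap, pvMsb]; omega

theorem pv_pad_block (cs zs : List Char) (j : Nat) (h : 4 * j + 4 ≤ cs.length) :
    ((cs ++ zs).drop (4 * j)).take 4 = (cs.drop (4 * j)).take 4 := by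
  rw [List.drop_append_of_le_length (by omega),
    List.take_append_of_le_length (by simp [List.length_drop]; omega)]

-- ===== VERDICT (by name: the statement is the Claim_ definition above) =====
theorem base85_encoder_spec : Claim_equal_base85_encoder := by
  intro p _
  unfold Spec_base85_encoder base85_encoder base85_encoder_alt
  dsimp only
  set cs := p.toList with hcs
  set n := cs.length with hn
  have hmod : PySem.Int.mod (n : Int) 4 = ((n % 4 : Nat) : Int) := PySem.Int.mod_natCast n 4
  set r := n % 4 with hrdef
  have hr4 : r < 4 := Nat.mod_lt _ (by norm_num)
  by_cases hr : r = 0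
  · -- no padding, no partial block
    have hm : n = 4 * (n / 4) := by omega
    set m := n / 4 with hmdef
    rw [hmod, if_neg (by simp [hr]), if_neg (by simp [hr]), if_neg (by simp [hr])]
    rw [pv_A_blocks (fun token =>
      ((PySem.List.pyRange 0 5 1).foldl
        (fun (st : List Char × Int) _ =>
          (st.1 ++ [PySem.List.pyGetD base85_alphabet (PySem.Int.mod st.2 85) ' '],
           PySem.Int.floordiv st.2 85))
        (([] : List Char), token.foldl (fun v c => v * 256 + (c.toNat : Int)) 0)).1.reverse)
      cs m hm]
    have hfull : ((n : Int) - ((r : Nat) : Int)) = ((4 * m : Nat) : Int) := by push_cast; omega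
    rw [hfull]
    have hbody : (fun (out : List Char) (k : Int) =>
        (PySem.List.pyRange 4 (-1) (-1)).foldl (fun out i =>
          out ++ [PySem.List.pyGetD base85_alphabet
            (PySem.Int.mod (PySem.Int.floordiv
              ((PySem.List.slice cs (some k) (some (k + 4))).foldl
                (fun v c => v * 256 + (c.toNat : Int)) 0) (85 ^ i.toNat)) 85) ' ']) out)
        = (fun out k => out ++ pvMsb (pvNatVal (PySem.List.slice cs (some k) (some (k + 4))))) := by
      funext out k; exact pv_FB _ _
    rw [hbody, pv_B_blocks]
    exact congrArg String.ofList (List.flatMap_congr (fun j _ => pv_FA _))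
  · -- padding needed
    have hrem : (4 - ((r : Nat) : Int)) = (((4 - r : Nat)) : Int) := by omega
    have hr1 : 1 ≤ r := by omega
    set m := n / 4 with hmdef
    have hnm : n = 4 * m + r := by omega
    have h0 : ((r : Nat) : Int) ≠ 0 := Nat.cast_ne_zero.mpr hr
    rw [hmod]
    simp only [if_pos h0]
    simp only [PySem.List.pyRepeat_singleton]
    have htn : ((4 : Int) - ((r : Nat) : Int)).toNat = 4 - r := by omega
    simp only [htn]
    have h2 : ((4 : Int) - ((r : Nat) : Int)) ≠ 0 := by omega
    simp only [if_pos h2]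
    have hlen : (cs ++ List.replicate (4 - r) '\x00').length = 4 * (m + 1) := by
      simp [List.length_append, List.length_replicate]; omega
    rw [pv_A_blocks (fun token =>
      ((PySem.List.pyRange 0 5 1).foldl
        (fun (st : List Char × Int) _ =>
          (st.1 ++ [PySem.List.pyGetD base85_alphabet (PySem.Int.mod st.2 85) ' '],
           PySem.Int.floordiv st.2 85))
        (([] : List Char), token.foldl (fun v c => v * 256 + (c.toNat : Int)) 0)).1.reverse)
      _ (m + 1) hlen]
    rw [List.flatMap_congr (fun j _ => pv_FA _)]
    rw [List.range_succ, List.flatMap_append]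
    simp only [List.flatMap_cons, List.flatMap_nil, List.append_nil]
    rw [List.flatMap_congr (l := List.range m) (fun j hj => by
      rw [pv_pad_block _ _ _ (by rw [List.mem_range] at hj; omega)])]
    have hlast : ((cs ++ List.replicate (4 - r) '\x00').drop (4 * m)).take 4
        = cs.drop (4 * m) ++ List.replicate (4 - r) '\x00' := by
      rw [List.drop_append_of_le_length (by omega)]
      exact List.take_of_length_le (by simp [List.length_drop, List.length_replicate]; omega)
    rw [hlast]
    rw [show ((n : Nat) : Int) - ((r : Nat) : Int) = ((4 * m : Nat) : Int) by push_cast; omega]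
    rw [PySem.List.slice_from_natCast]
    have hbody : (fun (out : List Char) (k : Int) =>
        (PySem.List.pyRange 4 (-1) (-1)).foldl (fun out i =>
          out ++ [PySem.List.pyGetD base85_alphabet
            (PySem.Int.mod (PySem.Int.floordiv
              ((PySem.List.slice cs (some k) (some (k + 4))).foldl
                (fun v c => v * 256 + (c.toNat : Int)) 0) (85 ^ i.toNat)) 85) ' ']) out)
        = (fun out k => out ++ pvMsb (pvNatVal (PySem.List.slice cs (some k) (some (k + 4))))) := by
      funext out k; exact pv_FB _ _
    rw [hbody, pv_B_blocks]
    rw [pv_tailB _ _ r (by omega)]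
    rw [hrem, PySem.List.slice_zero_start, PySem.List.slice_to_neg_natCast _ (4 - r) (by omega)]
    have hX : (List.flatMap (fun j => pvMsb (pvNatVal (List.take 4 (List.drop (4 * j) cs))))
        (List.range m)).length = 5 * m := pv_len_blocks _ m
    have hY : (pvMsb (pvNatVal (List.drop (4 * m) cs ++ List.replicate (4 - r) '\x00'))).length = 5 := by
      simp [pvMsb]
    rw [List.take_append, List.take_of_length_le (by rw [List.length_append, hX, hY]; omega)]
    have hidx : (List.flatMap (fun j => pvMsb (pvNatVal (List.take 4 (List.drop (4 * j) cs))))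
          (List.range m) ++
        pvMsb (pvNatVal (List.drop (4 * m) cs ++ List.replicate (4 - r) '\x00'))).length -
        (4 - r) -
      (List.flatMap (fun j => pvMsb (pvNatVal (List.take 4 (List.drop (4 * j) cs))))
          (List.range m)).length = r + 1 := by
      rw [List.length_append, hX, hY]; omega
    rw [hidx]
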